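-- pv_equiv track=rewrite | github.com/Leonardl27/poker_pipeline_v2 | hud_stats.py | _seats_clockwise
-- ===== SOURCE A (Python) =====
-- def _seats_clockwise(active_seats: list[int], dealer_seat: int) -> list[int]:
--     """Return active seats in clockwise order starting AFTER the dealer.
--
--     Poker preflop action order: UTG … CO, BTN, SB, BB.
--     We sort seats so that the first seat after the BB acts first preflop
--     and the BB acts last.
--     """
--     seats = sorted(active_seats)
--     if not seats:
--         return []
--     # Rotate so dealer is first, then seats proceed clockwise
--     idx = 0
--     for i, s in enumerate(seats):
--         if s > dealer_seat:
--             idx = i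
--             break
--     else:
--         idx = 0  # wrap around
--     return seats[idx:] + seats[:idx]
-- ===== SOURCE B (Python) =====
-- def _seats_clockwise(active_seats: list[int], dealer_seat: int) -> list[int]:
--     """Clockwise order after the dealer via a single composite-key sort."""
--     return sorted(active_seats, key=lambda s: (s <= dealer_seat, s))
-- ===== Notes on version B (the rewrite author's own statement) =====
-- stated objective: idiomatic
-- what changed: Replaced sort + linear scan for the rotation point + two slices with one sorted() call whose composite key (s <= dealer_seat, s) yields the rotated order directly.
import Mathlib
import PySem

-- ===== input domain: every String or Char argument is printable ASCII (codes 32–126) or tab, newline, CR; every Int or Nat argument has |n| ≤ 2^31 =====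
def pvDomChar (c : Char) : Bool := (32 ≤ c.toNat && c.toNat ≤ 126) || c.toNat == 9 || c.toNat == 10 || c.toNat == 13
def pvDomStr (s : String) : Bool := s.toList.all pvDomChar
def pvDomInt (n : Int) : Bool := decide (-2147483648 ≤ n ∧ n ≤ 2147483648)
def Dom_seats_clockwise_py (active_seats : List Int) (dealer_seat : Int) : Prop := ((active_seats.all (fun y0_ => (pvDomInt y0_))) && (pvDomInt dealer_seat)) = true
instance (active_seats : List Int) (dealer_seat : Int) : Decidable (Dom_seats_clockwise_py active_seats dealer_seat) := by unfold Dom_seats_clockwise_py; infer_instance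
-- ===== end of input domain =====

-- B replaces A's sort + rotation-index scan + two slices by one stable sort with the
-- composite key (s <= dealer_seat, s); same O(n log n) cost, more idiomatic.


-- ===== PORT A =====
-- the 'for i, s in enumerate(seats): if s > dealer_seat: idx = i; break / else: idx = 0' loop
def pvFindIdxA (dealer_seat : Int) : List (Int × Int) → Int
  | [] => 0
  | (i, s) :: rest => if s > dealer_seat then i else pvFindIdxA dealer_seat rest

def seats_clockwise_py (active_seats : List Int) (dealer_seat : Int) : List Int :=
  let seats := PySem.List.sorted active_seats (fun x => x) false
  if seats = [] then []
  else
    let idx := pvFindIdxA dealer_seat (PySem.List.enumerate seats 0)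
    PySem.List.slice seats (some idx) none ++ PySem.List.slice seats none (some idx)

-- ===== PORT B =====
def seats_clockwise_py_alt (active_seats : List Int) (dealer_seat : Int) : List Int :=
  PySem.List.sorted2 active_seats (fun s => decide (s ≤ dealer_seat)) (fun s => s) false

-- ===== PRECONDITION & SPEC =====
def Spec_seats_clockwise_py (active_seats : List Int) (dealer_seat : Int) (out : List Int) : Prop := out = seats_clockwise_py_alt active_seats dealer_seat
instance (active_seats : List Int) (dealer_seat : Int) (out : List Int) : Decidable (Spec_seats_clockwise_py active_seats dealer_seat out) := by unfold Spec_seats_clockwise_py; infer_instance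

-- ===== CLAIM (what is proved, stated in full; the proofs are below) =====
def Claim_equal_seats_clockwise_py : Prop := ∀ (active_seats : List Int) (dealer_seat : Int), Dom_seats_clockwise_py active_seats dealer_seat → Spec_seats_clockwise_py active_seats dealer_seat (seats_clockwise_py active_seats dealer_seat)

-- ===== LEMMAS AND PROOFS =====

-- the composite key, valued in the lexicographic product (Python's tuple order)
def pvKey (d s : Int) : Lex (Bool × Int) := toLex (decide (s ≤ d), s)

theorem pvKey_inj (d : Int) : Function.Injective (pvKey d) := by
  intro a b h
  simpa using congrArg (fun x => (ofLex x).2) h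

-- sorted2's lexicographic 'before' test IS the strict order of pvKey
theorem pvBefore_eq (d : Int) :
    (fun a b : Int => decide ((decide (a ≤ d)) < (decide (b ≤ d))) ||
      (!decide ((decide (b ≤ d)) < (decide (a ≤ d))) && decide (a < b)))
    = fun a b => decide (pvKey d a < pvKey d b) := by
  funext a b
  simp only [pvKey, Prod.Lex.lt_iff]
  by_cases ha : a ≤ d <;> by_cases hb : b ≤ d <;> simp [ha, hb]

theorem pvFoldl_pairwise (d : Int) (xs : List Int) (acc : List Int)
    (h : acc.Pairwise (fun a b => pvKey d a ≤ pvKey d b)) :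
    (xs.foldl (fun acc x => PySem.List.insertBy (fun a b => decide (pvKey d a < pvKey d b)) x acc) acc).Pairwise
      (fun a b => pvKey d a ≤ pvKey d b) := by
  induction xs generalizing acc with
  | nil => exact h
  | cons x t ih =>
    exact ih _ (PySem.List.insertBy_pairwise_le (pvKey d) x acc h)

theorem pvAlt_pairwise (d : Int) (xs : List Int) :
    (seats_clockwise_py_alt xs d).Pairwise (fun a b => pvKey d a ≤ pvKey d b) := by
  unfold seats_clockwise_py_alt
  simp only [PySem.List.sorted2, if_neg (by simp : ¬ (false = true))]
  rw [pvBefore_eq d]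
  exact pvFoldl_pairwise d xs [] List.Pairwise.nil

-- the rotation-index loop: first index whose seat is > d (start offset i), when one exists
theorem pvFindIdxA_eq (d : Int) (l : List Int) (i : Int) (h : ∃ s ∈ l, d < s) :
    pvFindIdxA d (PySem.List.enumerate l i) = i + ((l.takeWhile (fun s => decide (s ≤ d))).length : Int) := by
  induction l generalizing i with
  | nil => simp at h
  | cons a t ih =>
    rw [PySem.List.enumerate_cons]
    by_cases ha : d < a
    · simp [pvFindIdxA, ha, show ¬ (a ≤ d) by omega]
    · have ht : ∃ s ∈ t, d < s := by
        rcases h with ⟨s, hs, hds⟩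
        rcases List.mem_cons.mp hs with rfl | hst
        · omega
        · exact ⟨s, hst, hds⟩
      simp only [pvFindIdxA, if_neg (by omega : ¬ a > d), ih (i + 1) ht,
        List.takeWhile_cons, show decide (a ≤ d) = true by simp; omega]
      simp; omega

theorem pvFindIdxA_zero (d : Int) (l : List Int) (i : Int) (h : ∀ s ∈ l, s ≤ d) :
    pvFindIdxA d (PySem.List.enumerate l i) = 0 := by
  induction l generalizing i with
  | nil => rfl
  | cons a t ih =>
    rw [PySem.List.enumerate_cons]
    simp only [pvFindIdxA, if_neg (by have := h a (by simp); omega : ¬ a > d)]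
    exact ih (i + 1) (fun s hs => h s (by simp [hs]))

theorem pvTake_takeWhile (p : Int → Bool) (l : List Int) :
    l.take (l.takeWhile p).length = l.takeWhile p := by
  calc l.take (l.takeWhile p).length
      = (l.takeWhile p ++ l.dropWhile p).take (l.takeWhile p).length := by
        rw [List.takeWhile_append_dropWhile]
    _ = l.takeWhile p := List.take_left' rfl

theorem pvDrop_takeWhile (p : Int → Bool) (l : List Int) :
    l.drop (l.takeWhile p).length = l.dropWhile p := by
  calc l.drop (l.takeWhile p).length
      = (l.takeWhile p ++ l.dropWhile p).drop (l.takeWhile p).length := by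
        rw [List.takeWhile_append_dropWhile]
    _ = l.dropWhile p := List.drop_left' rfl

-- every seat surviving dropWhile (· ≤ d) of an ascending list is > d
theorem pvDropWhile_gt (d : Int) (L : List Int) (hL : L.Pairwise (· ≤ ·))
    (x : Int) (hx : x ∈ L.dropWhile (fun s => decide (s ≤ d))) : d < x := by
  have hsub : (L.dropWhile (fun s => decide (s ≤ d))).Pairwise (· ≤ ·) :=
    hL.sublist (List.dropWhile_sublist _)
  cases hD : L.dropWhile (fun s => decide (s ≤ d)) with
  | nil => simp [hD] at hx
  | cons hd tl =>
    have hhd : ¬ (hd ≤ d) := by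
      have := List.head_dropWhile_not (fun s => decide (s ≤ d)) (l := L) (by simp [hD])
      simpa [hD] using this
    rw [hD] at hx hsub
    rcases List.mem_cons.mp hx with rfl | hxt
    · omega
    · have := (List.pairwise_cons.mp hsub).1 x hxt
      omega

theorem pvMemTakeWhile_le (d x : Int) (L : List Int)
    (hx : x ∈ L.takeWhile (fun s => decide (s ≤ d))) : x ≤ d := by
  induction L with
  | nil => simp at hx
  | cons a t ih =>
    rw [List.takeWhile_cons] at hx
    by_cases h : a ≤ d
    · simp [h] at hx
      rcases hx with rfl | hx
      · exact h
      · exact ih hx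
    · simp [h] at hx

theorem pvRot_pairwise (d : Int) (L : List Int) (hL : L.Pairwise (· ≤ ·)) :
    (L.dropWhile (fun s => decide (s ≤ d)) ++ L.takeWhile (fun s => decide (s ≤ d))).Pairwise
      (fun a b => pvKey d a ≤ pvKey d b) := by
  have hmono : ∀ a b : Int, a ≤ b → (decide (a ≤ d) : Bool) = decide (b ≤ d) → pvKey d a ≤ pvKey d b := by
    intro a b hab hk
    simp only [pvKey, Prod.Lex.le_iff]
    exact Or.inr ⟨hk, hab⟩
  rw [List.pairwise_append]
  refine ⟨?_, ?_, ?_⟩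
  · refine (hL.sublist (List.dropWhile_sublist _)).imp_of_mem ?_
    intro a b ha hb hab
    have hda := pvDropWhile_gt d L hL a ha
    have hdb := pvDropWhile_gt d L hL b hb
    exact hmono a b hab (by simp; omega)
  · refine (hL.sublist (List.takeWhile_sublist _)).imp_of_mem ?_
    intro a b ha hb hab
    have hda := pvMemTakeWhile_le d a L ha
    have hdb := pvMemTakeWhile_le d b L hb
    exact hmono a b hab (by simp; omega)
  · intro a ha b hb
    have hda := pvDropWhile_gt d L hL a ha
    have hdb := pvMemTakeWhile_le d b L hb
    simp only [pvKey, Prod.Lex.le_iff]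
    exact Or.inl (by simp [Bool.lt_iff]; omega)

-- ===== VERDICT (by name: the statement is the Claim_ definition above) =====
theorem seats_clockwise_py_spec : Claim_equal_seats_clockwise_py := by
  intro xs d _
  unfold Spec_seats_clockwise_py seats_clockwise_py
  set L := PySem.List.sorted xs (fun x => x) false with hLdef
  have hLpair : L.Pairwise (· ≤ ·) := PySem.List.sorted_pairwise xs (fun x => x)
  have hLperm : L.Perm xs := PySem.List.sorted_perm xs (fun x => x) false
  have hfin : ∀ out : List Int,
      out.Perm L → out.Pairwise (fun a b => pvKey d a ≤ pvKey d b) →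
      out = seats_clockwise_py_alt xs d := by
    intro out hperm hpair
    exact PySem.List.eq_of_perm_of_pairwise_le_of_injective (pvKey d) (pvKey_inj d)
      (hperm.trans (hLperm.trans (PySem.List.sorted2_perm xs _ _ false).symm)) hpair
      (pvAlt_pairwise d xs)
  by_cases hnil : L = []
  · rw [if_pos hnil]
    exact hfin [] (by rw [hnil]) List.Pairwise.nil
  · rw [if_neg hnil]
    set p : Int → Bool := fun s => decide (s ≤ d) with hp
    have hrot :
        PySem.List.slice L (some (pvFindIdxA d (PySem.List.enumerate L 0))) none ++
          PySem.List.slice L none (some (pvFindIdxA d (PySem.List.enumerate L 0))) =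
        L.dropWhile p ++ L.takeWhile p := by
      by_cases hex : ∃ s ∈ L, d < s
      · rw [pvFindIdxA_eq d L 0 hex]
        simp only [zero_add]
        rw [PySem.List.slice_from_natCast, PySem.List.slice_to_natCast,
          pvDrop_takeWhile, pvTake_takeWhile]
      · have hall : ∀ s ∈ L, s ≤ d := by
          intro s hs; by_contra hc; exact hex ⟨s, hs, by omega⟩
        rw [pvFindIdxA_zero d L 0 hall]
        rw [show (0 : Int) = ((0 : Nat) : Int) by norm_num,
          PySem.List.slice_from_natCast, PySem.List.slice_to_natCast]
        have h1 : L.takeWhile p = L := List.takeWhile_eq_self_iff.mpr (by simpa [hp] using hall)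
        have h2 : L.dropWhile p = [] := List.dropWhile_eq_nil_iff.mpr (by simpa [hp] using hall)
        simp [h1, h2]
    rw [hrot]
    refine hfin _ ?_ (pvRot_pairwise d L hLpair)
    calc (L.dropWhile p ++ L.takeWhile p).Perm (L.takeWhile p ++ L.dropWhile p) := List.perm_append_comm
      _ = L := List.takeWhile_append_dropWhile
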